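-- pv_equiv track=rewrite | github.com/Eiriksen/Advent-of-code | AOC 2025/day 3 - batteries.py | get_2batteries
-- ===== SOURCE A (Python) =====
-- def locate_in_list(li,symbol):
--    return([i for i, x in enumerate(li) if x == symbol])
--
-- def get_2batteries(bank):
--   bank = [int(i) for i in bank]
--   subbank1 = bank[0:len(bank)-1]
--   b1 = max(subbank1)
--   pos1 = locate_in_list(subbank1,b1)[0]
--   subbank2 = bank[pos1+1:len(bank)]
--   b2 = max(subbank2)
--   return(10*b1+1*b2)
-- ===== SOURCE B (Python) =====
-- def get_2batteries(bank):
--     bank = [int(i) for i in bank]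
--     suf = bank[-1]
--     best = None
--     ans = None
--     for x in reversed(bank[:-1]):
--         if best is None or x >= best:
--             best = x
--             ans = 10 * x + suf
--         if x > suf:
--             suf = x
--     return ans
-- ===== Notes on version B (the rewrite author's own statement) =====
-- stated objective: alternative
-- what changed: A parses, slices off the last element, takes a global max, locates its first index with an enumerate-comprehension, slices again and takes a second max (three separate scans plus an index search); B makes one reverse pass over bank[:-1] keeping a running suffix-max, a running best-first-battery and the current answer, updating the answer whenever the scanned element ties or beats the best so far (leftmost maximum wins).
import Mathlib
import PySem

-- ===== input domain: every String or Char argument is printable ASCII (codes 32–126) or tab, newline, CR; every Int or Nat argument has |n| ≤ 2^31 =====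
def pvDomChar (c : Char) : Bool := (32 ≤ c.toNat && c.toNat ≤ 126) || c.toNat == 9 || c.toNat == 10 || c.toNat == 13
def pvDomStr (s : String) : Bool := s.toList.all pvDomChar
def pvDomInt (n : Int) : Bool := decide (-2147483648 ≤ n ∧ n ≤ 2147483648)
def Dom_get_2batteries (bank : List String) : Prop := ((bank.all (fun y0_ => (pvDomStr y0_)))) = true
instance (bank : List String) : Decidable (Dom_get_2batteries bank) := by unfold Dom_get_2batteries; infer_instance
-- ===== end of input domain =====

-- One honest line: B replaces A's global-max / first-locate / suffix-max multi-pass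
-- with a single reverse pass keeping a running suffix-max; equal return value on Pre_.

-- ===== PORT A =====
-- locate_in_list(li, symbol) = [i for i, x in enumerate(li) if x == symbol]
def locate_in_list (li : List Int) (symbol : Int) : List Int :=
  ((PySem.List.enumerate li 0).filter (fun p => p.2 == symbol)).map Prod.fst

-- the body of A after 'bank = [int(i) for i in bank]'; matches with 'none' are
-- where Python raises (ValueError on max([]), IndexError on [][0]) — excluded by Pre_
def aCore (bankI : List Int) : Int :=
  match PySem.List.max? (PySem.List.slice bankI (some 0) (some ((bankI.length : Int) - 1))) (fun y => y) with
  | none => 0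
  | some b1 =>
    match PySem.List.pyGet? (locate_in_list (PySem.List.slice bankI (some 0) (some ((bankI.length : Int) - 1))) b1) 0 with
    | none => 0
    | some pos1 =>
      match PySem.List.max? (PySem.List.slice bankI (some (pos1 + 1)) (some (bankI.length : Int))) (fun y => y) with
      | none => 0
      | some b2 => 10 * b1 + 1 * b2

def get_2batteries (bank : List String) : Int :=
  aCore (bank.map (fun s => (PySem.Int.ofStr? s).getD 0))

-- ===== PORT B =====
-- one iteration of B's loop body; state = (suf, best, ans)
def bStep (s : Int × Option Int × Option Int) (x : Int) : Int × Option Int × Option Int :=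
  let p : Bool := match s.2.1 with | none => true | some b => decide (b ≤ x)
  ((if s.1 < x then x else s.1),
   (if p then some x else s.2.1),
   (if p then some (10 * x + s.1) else s.2.2))

-- the body of B after 'bank = [int(i) for i in bank]'; suf = bank[-1],
-- loop over reversed(bank[:-1]); 'return ans' (ans = None is outside Pre_, ported as 0)
def bCore (bankI : List Int) : Int :=
  ((((PySem.List.slice bankI none (some (-1))).reverse).foldl bStep
      ((PySem.List.pyGet? bankI (-1)).getD 0, none, none)).2.2).getD 0

def get_2batteries_alt (bank : List String) : Int :=
  bCore (bank.map (fun s => (PySem.Int.ofStr? s).getD 0))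

-- ===== PRECONDITION & SPEC =====
-- Pre_: exactly where Python A returns: every string parses as int (else ValueError)
-- and there are at least two batteries (else max() of an empty sequence raises ValueError).
def Pre_get_2batteries (bank : List String) : Prop :=
  2 ≤ bank.length ∧ bank.all (fun s => (PySem.Int.ofStr? s).isSome) = true
instance (bank : List String) : Decidable (Pre_get_2batteries bank) := by
  unfold Pre_get_2batteries; infer_instance

def pvWitness_get_2batteries : List String := ["3", "9", "5", "9"]

def Spec_get_2batteries (bank : List String) (out : Int) : Prop := out = get_2batteries_alt bank
instance (bank : List String) (out : Int) : Decidable (Spec_get_2batteries bank out) := by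
  unfold Spec_get_2batteries; infer_instance

-- ===== CLAIM (what is proved, stated in full; the proofs are below) =====
def Claim_equal_get_2batteries : Prop := ∀ (bank : List String), Dom_get_2batteries bank → Pre_get_2batteries bank → Spec_get_2batteries bank (get_2batteries bank)

-- ===== LEMMAS AND PROOFS =====

-- max of the nonempty list x :: t, as A's max? computes it
def mx : List Int → Int
  | [] => 0
  | x :: t => t.foldl max x

-- B's loop state after processing l.reverse, defined by structural recursion on l
def triSpec (z : Int) : List Int → Int × Option Int × Option Int
  | [] => (z, none, none)
  | x :: t => bStep (triSpec z t) x

theorem foldl_max_swap (u : List Int) (c : Int) :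
    ∀ a, u.foldl max (max c a) = max c (u.foldl max a) := by
  induction u with
  | nil => intro a; rfl
  | cons y u ih =>
    intro a
    simp only [List.foldl_cons]
    rw [max_assoc c a y, ih]

theorem foldl_max_of_le (u : List Int) : ∀ a, (∀ e ∈ u, e ≤ a) → u.foldl max a = a := by
  induction u with
  | nil => intro a _; rfl
  | cons y u ih =>
    intro a h
    simp only [List.foldl_cons]
    rw [max_eq_left (h y (by simp))]
    exact ih a (fun e he => h e (by simp [he]))

-- t.foldl max x = max x (mx t) for nonempty t = y :: u
theorem foldl_max_cons_mx (y : Int) (u : List Int) (x : Int) :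
    (y :: u).foldl max x = max x (mx (y :: u)) := by
  show u.foldl max (max x y) = max x (u.foldl max y)
  exact foldl_max_swap u x y

theorem max?_append_singleton (u : List Int) (z : Int) :
    PySem.List.max? (u ++ [z]) (fun y => y) = some (u.foldl max z) := by
  cases u with
  | nil => simp [PySem.List.max?_id_cons]
  | cons c d =>
    rw [List.cons_append, PySem.List.max?_id_cons]
    congr 1
    rw [List.foldl_append]
    simp only [List.foldl_cons, List.foldl_nil]
    -- max (d.foldl max c) z = d.foldl max (max z c)
    show max (d.foldl max c) z = d.foldl max (max z c)
    rw [foldl_max_swap d z c]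
    exact max_comm _ _

theorem locate_head (v : Int) : ∀ (li : List Int) (s : Int), v ∈ li →
    (((PySem.List.enumerate li s).filter (fun p => p.2 == v)).map Prod.fst).head?
      = some (s + (li.idxOf v : Int)) := by
  intro li
  induction li with
  | nil => intro s h; simp at h
  | cons x t ih =>
    intro s h
    rw [PySem.List.enumerate_cons]
    by_cases hx : x = v
    · subst hx
      simp [List.idxOf_cons_self]
    · have hv : v ∈ t := by
        rcases List.mem_cons.mp h with h' | h'
        · exact absurd h'.symm hx
        · exact h'
      have hne : (x == v) = false := beq_false_of_ne hx
      rw [List.filter_cons]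
      simp only [hne, Bool.false_eq_true, if_false]
      rw [ih (s + 1) hv, List.idxOf_cons_ne _ hx]
      simp only [Option.some.injEq, Nat.succ_eq_add_one]
      push_cast
      ring

-- A's value on l ++ [z] in closed form: 10 * (max of l) + max of everything
-- after the first occurrence of that max
theorem aCore_eq (l : List Int) (z : Int) (hl : l ≠ []) :
    aCore (l ++ [z]) = 10 * mx l + ((l.drop (l.idxOf (mx l) + 1)).foldl max z) := by
  obtain ⟨x, t, rfl⟩ := List.exists_cons_of_ne_nil hl
  have hlen : ((x :: t ++ [z]).length : Int) - 1 = (((x :: t).length : Nat) : Int) := by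
    simp
  have hsub1 : PySem.List.slice (x :: t ++ [z]) (some 0) (some (((x :: t ++ [z]).length : Int) - 1))
      = x :: t := by
    rw [hlen, PySem.List.slice_zero_start, PySem.List.slice_to_natCast]
    simp
  have hmx : mx (x :: t) ∈ x :: t := by
    show t.foldl max x ∈ x :: t
    rcases PySem.List.foldl_max_mem t x with h | h
    · rw [h]; simp
    · simp [h]
  have hb1 : PySem.List.max? (x :: t) (fun y => y) = some (mx (x :: t)) := by
    rw [PySem.List.max?_id_cons]; rfl
  have hk := List.idxOf_lt_length_of_mem hmx
  have hloc : PySem.List.pyGet? (locate_in_list (x :: t) (mx (x :: t))) 0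
      = some (((x :: t).idxOf (mx (x :: t)) : Nat) : Int) := by
    unfold locate_in_list
    rw [PySem.List.pyGet?_zero, ← List.head?_eq_getElem?]
    rw [locate_head _ _ 0 hmx]
    simp
  have hsub2 : PySem.List.slice (x :: t ++ [z])
      (some ((((x :: t).idxOf (mx (x :: t)) : Nat) : Int) + 1)) (some ((x :: t ++ [z]).length : Int))
      = (x :: t).drop ((x :: t).idxOf (mx (x :: t)) + 1) ++ [z] := by
    have h1 : ((((x :: t).idxOf (mx (x :: t)) : Nat) : Int) + 1)
        = (((x :: t).idxOf (mx (x :: t)) + 1 : Nat) : Int) := by push_cast; ring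
    rw [h1, PySem.List.slice_natCast]
    rw [List.drop_append_of_le_length (by simpa using Nat.le_of_lt_succ (Nat.succ_lt_succ hk))]
    apply List.take_of_length_le
    simp only [List.length_append, List.length_drop, List.length_cons, List.length_nil] at hk ⊢
    omega
  unfold aCore
  simp only [hsub1, hb1, hloc, hsub2, max?_append_singleton]
  ring

theorem tri_suf (z : Int) (l : List Int) : (triSpec z l).1 = l.foldl max z := by
  induction l with
  | nil => rfl
  | cons x t ih =>
    show (bStep (triSpec z t) x).1 = _
    unfold bStep
    simp only [ih, List.foldl_cons]
    rw [show max z x = max x z from max_comm z x, foldl_max_swap]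
    by_cases h : t.foldl max z < x
    · rw [if_pos h, max_eq_left h.le]
    · rw [if_neg h, max_eq_right (not_lt.mp h)]

theorem tri_best (z : Int) (l : List Int) (hl : l ≠ []) :
    (triSpec z l).2.1 = some (mx l) := by
  induction l with
  | nil => exact absurd rfl hl
  | cons x t ih =>
    show (bStep (triSpec z t) x).2.1 = _
    cases t with
    | nil => rfl
    | cons y u =>
      unfold bStep
      rw [ih (by simp)]
      have hbd := PySem.List.le_foldl_max u y
      simp only
      by_cases h : mx (y :: u) ≤ x
      · rw [if_pos (by simpa using h)]
        have hall : ∀ e ∈ y :: u, e ≤ x := by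
          intro e he
          rcases List.mem_cons.mp he with rfl | he'
          · exact le_trans hbd.1 h
          · exact le_trans (hbd.2 e he') h
        show some x = some (mx (x :: y :: u))
        rw [show mx (x :: y :: u) = (y :: u).foldl max x from rfl,
          foldl_max_of_le _ _ hall]
      · rw [if_neg (by simpa using h)]
        show some (mx (y :: u)) = some (mx (x :: y :: u))
        rw [show mx (x :: y :: u) = (y :: u).foldl max x from rfl, foldl_max_cons_mx,
          max_eq_right (le_of_lt (not_le.mp h))]

theorem tri_ans (z : Int) (l : List Int) (hl : l ≠ []) :
    (triSpec z l).2.2 = some (10 * mx l + ((l.drop (l.idxOf (mx l) + 1)).foldl max z)) := by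
  induction l with
  | nil => exact absurd rfl hl
  | cons x t ih =>
    show (bStep (triSpec z t) x).2.2 = _
    cases t with
    | nil =>
      show some (10 * x + z) = _
      simp [mx, List.idxOf_cons_self]
    | cons y u =>
      unfold bStep
      rw [tri_best z _ (by simp), tri_suf]
      have hbd := PySem.List.le_foldl_max u y
      simp only
      by_cases h : mx (y :: u) ≤ x
      · rw [if_pos (by simpa using h)]
        have hall : ∀ e ∈ y :: u, e ≤ x := by
          intro e he
          rcases List.mem_cons.mp he with rfl | he'
          · exact le_trans hbd.1 h
          · exact le_trans (hbd.2 e he') h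
        have hx : mx (x :: y :: u) = x := by
          rw [show mx (x :: y :: u) = (y :: u).foldl max x from rfl, foldl_max_of_le _ _ hall]
        rw [hx, List.idxOf_cons_self]
        simp
      · rw [if_neg (by simpa using h)]
        have hlt : x < mx (y :: u) := not_le.mp h
        have hx : mx (x :: y :: u) = mx (y :: u) := by
          rw [show mx (x :: y :: u) = (y :: u).foldl max x from rfl, foldl_max_cons_mx,
            max_eq_right hlt.le]
        rw [ih (by simp), hx, List.idxOf_cons_ne _ (ne_of_lt hlt)]
        simp [List.drop_succ_cons]

theorem foldl_reverse_tri (z : Int) (l : List Int) :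
    l.reverse.foldl bStep (z, none, none) = triSpec z l := by
  induction l with
  | nil => rfl
  | cons x t ih =>
    rw [List.reverse_cons, List.foldl_append, ih]
    rfl

theorem core_eq (a : List Int) (h : 2 ≤ a.length) : aCore a = bCore a := by
  have hne : a ≠ [] := by intro hc; subst hc; simp at h
  obtain ⟨l, z, rfl⟩ : ∃ l z, a = l ++ [z] := ⟨a.dropLast, a.getLast hne, by
    rw [List.dropLast_append_getLast hne]⟩
  have hl : l ≠ [] := by
    intro hc; subst hc; simp at h
  unfold bCore
  rw [PySem.List.pyGet?_neg_one_append_singleton, PySem.List.slice_to_neg_one,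
    List.dropLast_concat]
  show aCore (l ++ [z]) = ((l.reverse.foldl bStep (z, none, none)).2.2).getD 0
  rw [foldl_reverse_tri, tri_ans z l hl, aCore_eq l z hl]
  rfl

-- ===== VERDICT (by name: the statement is the Claim_ definition above) =====
theorem get_2batteries_spec : Claim_equal_get_2batteries := by
  intro bank _ hpre
  unfold Spec_get_2batteries get_2batteries get_2batteries_alt
  exact core_eq _ (by simpa using hpre.1)
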